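-- pv_equiv track=rewrite | github.com/samcheyette/resource-rational-games | constraint_games/utils/utils.py | get_solved_variables
-- ===== SOURCE A (Python) =====
-- def get_solved_variables(assignments):
--     if not assignments:
--         return {}
--
--     solved_variables = assignments[0].copy()
--     for assignment in assignments[1:]:
--         for var, val in assignment.items():
--             if solved_variables.get(var) != val:
--                 solved_variables.pop(var, None)
--
--     return solved_variables
-- ===== SOURCE B (Python) =====
-- def get_solved_variables(assignments):
--     if not assignments:
--         return {}
--     first = assignments[0]
--     rest = assignments[1:]
--     return {var: val for var, val in first.items()
--             if all(a.get(var, val) == val for a in rest)}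
-- ===== Notes on version B (the rewrite author's own statement) =====
-- stated objective: simpler
-- what changed: Instead of mutating a copy of the first assignment and popping conflicting variables per later assignment, B builds the result directly as a dict comprehension over the first assignment's items, keeping a variable iff every later assignment that contains it agrees on its value.
import Mathlib
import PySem

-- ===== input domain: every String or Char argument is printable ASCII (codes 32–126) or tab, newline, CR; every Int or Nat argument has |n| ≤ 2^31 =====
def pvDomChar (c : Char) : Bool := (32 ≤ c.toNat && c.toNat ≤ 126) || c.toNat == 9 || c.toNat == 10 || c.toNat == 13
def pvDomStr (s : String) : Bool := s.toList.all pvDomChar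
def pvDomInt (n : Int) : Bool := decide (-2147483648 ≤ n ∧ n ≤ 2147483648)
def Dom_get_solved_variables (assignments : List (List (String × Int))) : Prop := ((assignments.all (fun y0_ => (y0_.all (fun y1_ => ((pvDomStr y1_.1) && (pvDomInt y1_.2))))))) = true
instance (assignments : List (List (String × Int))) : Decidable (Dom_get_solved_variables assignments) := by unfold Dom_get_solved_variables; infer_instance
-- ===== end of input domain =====

-- B replaces A's mutate-and-pop elimination loop with a direct filter over the first
-- assignment's items (objective: simpler); A = B is proved on all inputs.


-- ===== PORT A =====
-- body of A's inner loop: "if solved_variables.get(var) != val: solved_variables.pop(var, None)"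
-- ('pop(var, None)' discards the popped value, so it is Dict.erase)
def pvStepA (s : PySem.Dict String Int) (p : String × Int) : PySem.Dict String Int :=
  if s.get? p.1 ≠ some p.2 then s.erase p.1 else s

-- body of A's outer loop: "for var, val in assignment.items(): …"
def pvAssignStepA (solved : PySem.Dict String Int) (assignment : PySem.Dict String Int) :
    PySem.Dict String Int :=
  assignment.items.foldl pvStepA solved

def get_solved_variables (assignments : List (List (String × Int))) : List (String × Int) :=
  match assignments with
  | [] => []
  | first :: rest =>
    ((rest.map PySem.Dict.ofList).foldl pvAssignStepA (PySem.Dict.ofList first)).items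

-- ===== PORT B =====
def get_solved_variables_alt (assignments : List (List (String × Int))) : List (String × Int) :=
  match assignments with
  | [] => []
  | first :: rest =>
    let rest' := rest.map PySem.Dict.ofList
    (PySem.Dict.ofList first).items.filter
      (fun p => rest'.all (fun a => a.getD p.1 p.2 == p.2))

-- ===== PRECONDITION & SPEC =====
def Spec_get_solved_variables (assignments : List (List (String × Int))) (out : List (String × Int)) : Prop := out = get_solved_variables_alt assignments
instance (assignments : List (List (String × Int))) (out : List (String × Int)) : Decidable (Spec_get_solved_variables assignments out) := by unfold Spec_get_solved_variables; infer_instance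

-- ===== CLAIM (what is proved, stated in full; the proofs are below) =====
def Claim_equal_get_solved_variables : Prop := ∀ (assignments : List (List (String × Int))), Dom_get_solved_variables assignments → Spec_get_solved_variables assignments (get_solved_variables assignments)

-- ===== LEMMAS AND PROOFS =====

-- erasing a key keeps the key list Nodup
theorem pv_nodup_keys_erase (d : PySem.Dict String Int) (k : String)
    (h : d.keys.Nodup) : (d.erase k).keys.Nodup := by
  have hsub : ((d.items.filter (fun p => !p.1 == k)).map (·.1)).Sublist (d.items.map (·.1)) :=
    List.Sublist.map _ List.filter_sublist
  simpa [PySem.Dict.erase, PySem.Dict.keys] using hsub.nodup (by simpa [PySem.Dict.keys] using h)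

-- one step of A's inner loop acts on the items list as a filter
theorem pv_step_items (s : PySem.Dict String Int) (p1 : String) (p2 : Int)
    (h : s.keys.Nodup) :
    (pvStepA s (p1, p2)).items
      = s.items.filter (fun q => !(p1 == q.1) || p2 == q.2) := by
  unfold pvStepA
  by_cases hg : s.get? p1 = some p2
  · simp only [hg, ne_eq, not_true_eq_false, if_false]
    symm
    apply List.filter_eq_self.2
    rintro ⟨a, b⟩ hq
    by_cases hk : p1 = a
    · subst hk
      have : s.get? p1 = some b := PySem.Dict.get?_of_mem_items s hq h
      rw [hg] at this
      simp [Option.some.inj this]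
    · simp [hk]
  · simp only [ne_eq, hg, not_false_eq_true, if_true, PySem.Dict.erase]
    apply List.filter_congr
    rintro ⟨a, b⟩ hq
    by_cases hk : a = p1
    · subst hk
      have hv : p2 ≠ b := by
        intro hv
        exact hg (hv ▸ PySem.Dict.get?_of_mem_items s hq h)
      simp [hv]
    · have h1 : (a == p1) = false := by simp [hk]
      have h2 : (p1 == a) = false := by simp [Ne.symm hk]
      rw [h1, h2]; simp

-- A's inner loop over any pair list filters the items by agreement with every pair
theorem pv_inner (l : List (String × Int)) :
    ∀ (s : PySem.Dict String Int), s.keys.Nodup →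
    (l.foldl pvStepA s).items
      = s.items.filter (fun q => l.all (fun p => !(p.1 == q.1) || p.2 == q.2)) := by
  induction l with
  | nil => intro s _; simp
  | cons p l ih =>
    intro s hs
    have hitems : (pvStepA s p).items
        = s.items.filter (fun q => !(p.1 == q.1) || p.2 == q.2) := pv_step_items s p.1 p.2 hs
    have hnd : (pvStepA s p).keys.Nodup := by
      unfold pvStepA; split
      · exact pv_nodup_keys_erase s p.1 hs
      · exact hs
    simp only [List.foldl_cons]
    rw [ih _ hnd, hitems, List.filter_filter]
    apply List.filter_congr
    intro q _
    simp [Bool.and_comm]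

-- agreement with every item of a Nodup-keyed dict is B's "a.get(var, val) == val" test
theorem pv_bridge (a : PySem.Dict String Int) (ha : a.keys.Nodup) (q1 : String) (q2 : Int) :
    a.items.all (fun p => !(p.1 == q1) || p.2 == q2) = (a.getD q1 q2 == q2) := by
  rcases hg : a.get? q1 with _ | v
  · have hnone : ∀ x y, (x, y) ∈ a.items → ¬ x = q1 := by
      simpa [PySem.Dict.get?, Option.map_eq_none_iff, List.find?_eq_none] using hg
    simp only [PySem.Dict.getD, hg, Option.getD_none, BEq.refl]
    apply List.all_eq_true.2
    rintro ⟨x, y⟩ hp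
    simp [hnone x y hp]
  · simp only [PySem.Dict.getD, hg, Option.getD_some]
    by_cases hv : v = q2
    · subst hv
      simp only [BEq.refl]
      apply List.all_eq_true.2
      rintro ⟨x, y⟩ hp
      by_cases hk : x = q1
      · subst hk
        have : a.get? x = some y := PySem.Dict.get?_of_mem_items a hp ha
        rw [hg] at this
        simp [Option.some.inj this]
      · simp [hk]
    · have hmem : (q1, v) ∈ a.items := PySem.Dict.mem_items_of_get?_eq_some a hg
      have hfalse : a.items.all (fun p => !(p.1 == q1) || p.2 == q2) = false :=
        List.all_eq_false.2 ⟨(q1, v), hmem, by simp [hv]⟩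
      simp [hfalse, hv]

-- A's outer loop over the later assignments
theorem pv_outer (ds : List (PySem.Dict String Int)) :
    ∀ (s : PySem.Dict String Int), s.keys.Nodup → (∀ d ∈ ds, d.keys.Nodup) →
    (ds.foldl pvAssignStepA s).items
      = s.items.filter (fun q => ds.all (fun a => a.getD q.1 q.2 == q.2)) := by
  induction ds with
  | nil => intro s _ _; simp
  | cons d ds ih =>
    intro s hs hds
    have hd : d.keys.Nodup := hds d (by simp)
    have hstep : (pvAssignStepA s d).items
        = s.items.filter (fun q => d.items.all (fun p => !(p.1 == q.1) || p.2 == q.2)) :=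
      pv_inner d.items s hs
    have hnd : (pvAssignStepA s d).keys.Nodup := by
      have hsub : ((s.items.filter
            (fun q => d.items.all (fun p => !(p.1 == q.1) || p.2 == q.2))).map (·.1)).Sublist
          (s.items.map (·.1)) := List.Sublist.map _ List.filter_sublist
      simpa [PySem.Dict.keys, hstep] using hsub.nodup (by simpa [PySem.Dict.keys] using hs)
    simp only [List.foldl_cons]
    rw [ih _ hnd (fun d' hd' => hds d' (by simp [hd'])), hstep, List.filter_filter]
    apply List.filter_congr
    intro q _
    rw [pv_bridge d hd q.1 q.2]
    simp [Bool.and_comm]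

-- ===== VERDICT (by name: the statement is the Claim_ definition above) =====
theorem get_solved_variables_spec : Claim_equal_get_solved_variables := by
  intro assignments _
  unfold Spec_get_solved_variables get_solved_variables get_solved_variables_alt
  match assignments with
  | [] => rfl
  | first :: rest =>
    simp only
    rw [pv_outer (rest.map PySem.Dict.ofList) (PySem.Dict.ofList first)
        (PySem.Dict.nodup_keys_ofList first)
        (by rintro d hd; rcases List.mem_map.1 hd with ⟨a, _, rfl⟩; exact PySem.Dict.nodup_keys_ofList a)]
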